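-- pv_equiv track=rewrite | github.com/netcon-consulting/clearswift-external-commands | command_library.py | end_escape
-- ===== SOURCE A (Python) =====
-- def end_escape(string):
--     """
--     Check string ending in uneven number of backslashes.
--
--     :type string: str
--     :rtype: bool
--     """
--     num_blackslash = 0
--
--     for char in string[::-1]:
--         if char == "\\":
--             num_blackslash = num_blackslash + 1
--         else:
--             break
--
--     return num_blackslash % 2 != 0
-- ===== SOURCE B (Python) =====
-- def end_escape(string):
--     """
--     Check string ending in uneven number of backslashes.
--
--     :type string: str
--     :rtype: bool
--     """
--     # Forward escape-state automaton: 'escaped' tells whether the NEXT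
--     # character would be escaped; a backslash toggles the state, any other
--     # character resets it.  The final state is exactly "string ends in an
--     # odd number of backslashes".
--     escaped = False
--     for char in string:
--         escaped = not escaped if char == "\\" else False
--     return escaped
-- ===== Notes on version B (the rewrite author's own statement) =====
-- stated objective: alternative
-- what changed: Instead of reversing the string and counting the trailing backslash run with a break, B scans forward once with a boolean escape-state automaton (a backslash toggles the state, any other character resets it); no reversal, no counter, no parity test.
import Mathlib
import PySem

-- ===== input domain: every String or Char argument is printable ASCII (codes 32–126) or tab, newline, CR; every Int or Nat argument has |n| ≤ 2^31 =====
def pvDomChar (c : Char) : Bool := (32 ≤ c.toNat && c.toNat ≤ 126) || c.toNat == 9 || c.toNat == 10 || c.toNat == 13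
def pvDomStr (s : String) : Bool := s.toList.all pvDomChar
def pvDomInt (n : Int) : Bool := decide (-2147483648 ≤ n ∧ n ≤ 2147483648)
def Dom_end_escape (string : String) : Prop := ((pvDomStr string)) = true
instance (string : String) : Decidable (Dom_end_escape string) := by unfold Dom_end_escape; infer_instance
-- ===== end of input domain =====

-- B replaces A's reverse scan-and-count by a forward boolean escape-state automaton: alternative decomposition, same cost.

-- ===== PORT A =====
-- the 'for char in string[::-1]: … else: break' loop: recursion over the reversed characters, accumulator num_blackslash
def endEscapeLoopA : List Char → Nat → Nat
  | [], n => n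
  | c :: cs, n => if c == '\\' then endEscapeLoopA cs (n + 1) else n

def end_escape (string : String) : Bool :=
  -- string[::-1]
  let rev := (PySem.Str.slice? string none none (-1)).getD ""
  let num := endEscapeLoopA rev.toList 0
  decide (num % 2 ≠ 0)

-- ===== PORT B =====
-- B's forward loop: 'escaped = not escaped if char == "\\" else False'
def endEscapeStepB (escaped : Bool) (c : Char) : Bool :=
  if c == '\\' then !escaped else false

def end_escape_alt (string : String) : Bool :=
  string.toList.foldl endEscapeStepB false

-- ===== PRECONDITION & SPEC =====
def Spec_end_escape (string : String) (out : Bool) : Prop := out = end_escape_alt string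
instance (string : String) (out : Bool) : Decidable (Spec_end_escape string out) := by unfold Spec_end_escape; infer_instance

-- ===== CLAIM (what is proved, stated in full; the proofs are below) =====
def Claim_equal_end_escape : Prop := ∀ (string : String), Dom_end_escape string → Spec_end_escape string (end_escape string)

-- ===== LEMMAS AND PROOFS =====

-- A's loop counts the leading backslash run of its input
theorem endEscapeLoopA_eq_takeWhile (cs : List Char) (n : Nat) :
    endEscapeLoopA cs n = n + (cs.takeWhile (· == '\\')).length := by
  induction cs generalizing n with
  | nil => simp [endEscapeLoopA]
  | cons c cs ih =>
    by_cases h : c == '\\'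
    · simp [endEscapeLoopA, h, ih, List.takeWhile]
      omega
    · simp [endEscapeLoopA, h, List.takeWhile]

-- B's automaton ends in state = parity of the trailing backslash run
theorem foldB_eq_parity (cs : List Char) :
    cs.foldl endEscapeStepB false
      = decide ((cs.reverse.takeWhile (· == '\\')).length % 2 = 1) := by
  induction cs using List.reverseRecOn with
  | nil => simp
  | append_singleton cs c ih =>
    rw [List.foldl_append]
    by_cases h : c == '\\'
    · simp only [List.foldl_cons, List.foldl_nil, endEscapeStepB, if_true, ih,
        List.reverse_append, List.reverse_singleton, List.singleton_append,
        List.takeWhile_cons, h, List.length_cons]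
      rcases Nat.mod_two_eq_zero_or_one (cs.reverse.takeWhile (· == '\\')).length with h2 | h2 <;>
        · simp [h2, Nat.add_mod]
    · simp [endEscapeStepB, h]

-- ===== VERDICT (by name: the statement is the Claim_ definition above) =====
theorem end_escape_spec : Claim_equal_end_escape := by
  intro s _
  unfold Spec_end_escape end_escape end_escape_alt
  rw [PySem.Str.slice?_none_none_neg_one]
  simp only [Option.getD_some, endEscapeLoopA_eq_takeWhile, Nat.zero_add,
    String.toList_ofList, foldB_eq_parity]
  rcases Nat.mod_two_eq_zero_or_one (s.toList.reverse.takeWhile (· == '\\')).length with h | h <;>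
    simp [h]
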